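-- pv_equiv track=rewrite | github.com/jiggylepcha/hello-world | a3.py | compare_distr
-- ===== SOURCE A (Python) =====
-- def compare_distr(L1,L2,bin):
-- 	a=len(L1)
-- 	b=len(L2)
-- 	x1=[]
-- 	x2=[]
-- 	if(a!=b):
-- 		return False
-- 	elif(a==0 or b==0):
-- 		return False
-- 	else:
-- 		#computing frequency distributuion for L1
-- 		L1.sort()
-- 		LL_L1=L1[0]
-- 		UL_L1=L1[a-1]
-- 		range_L1=UL_L1-LL_L1
-- 		temp_LL_L1=LL_L1
-- 		temp_UL_L1=LL_L1+bin
-- 		count_L1=int(range_L1/bin)+1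
-- 		for x in range(count_L1):
-- 			count1=0
-- 			for y in range(a):
-- 				if(temp_LL_L1<=L1[y]<temp_UL_L1):
-- 					count1+=1
-- 			x1.append(count1)
-- 			temp_LL_L1+=bin
-- 			temp_UL_L1+=bin
-- 		#in a similar fashion, computing frequency distributuion for L2
-- 		L2.sort()
-- 		LL_L2=L2[0]
-- 		UL_L2=L2[b-1]
-- 		range_L2=UL_L2-LL_L2
-- 		temp_LL_L2=LL_L2
-- 		temp_UL_L2=LL_L2+bin
-- 		count_L2=int(range_L2/bin)+1
-- 		for x in range(count_L2):
-- 			count2=0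
-- 			for z in range(b):
-- 				if(temp_LL_L2<=L2[z]<temp_UL_L2):
-- 					count2+=1
-- 			x2.append(count2)
-- 			temp_LL_L2+=bin
-- 			temp_UL_L2+=bin
--
-- 		if(x1==x2):
-- 			return True
-- 		else:
-- 			return False
-- ===== SOURCE B (Python) =====
-- def _hist(L, bin):
--     # L is sorted and non-empty; one pass: bucket index by arithmetic instead of
--     # rescanning the whole list for every bin.
--     lo = L[0]
--     hi = L[-1]
--     n = (hi - lo) // bin + 1
--     counts = [0] * n
--     for x in L:
--         counts[(x - lo) // bin] += 1
--     return counts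
--
-- def compare_distr(L1, L2, bin):
--     if len(L1) != len(L2) or len(L1) == 0:
--         return False
--     L1.sort()
--     L2.sort()
--     return _hist(L1, bin) == _hist(L2, bin)
-- ===== Notes on version B (the rewrite author's own statement) =====
-- stated objective: faster
-- what changed: Instead of looping over every bin and rescanning the whole list for each one, B makes a single pass over each sorted list, computing each element's bucket index arithmetically ((x-lo)//bin) and incrementing a preallocated counts array.
-- outside the precondition, e.g. on compare_distr([1, 2], [1, 3], -1): A returns True, B raises IndexError
import Mathlib
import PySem

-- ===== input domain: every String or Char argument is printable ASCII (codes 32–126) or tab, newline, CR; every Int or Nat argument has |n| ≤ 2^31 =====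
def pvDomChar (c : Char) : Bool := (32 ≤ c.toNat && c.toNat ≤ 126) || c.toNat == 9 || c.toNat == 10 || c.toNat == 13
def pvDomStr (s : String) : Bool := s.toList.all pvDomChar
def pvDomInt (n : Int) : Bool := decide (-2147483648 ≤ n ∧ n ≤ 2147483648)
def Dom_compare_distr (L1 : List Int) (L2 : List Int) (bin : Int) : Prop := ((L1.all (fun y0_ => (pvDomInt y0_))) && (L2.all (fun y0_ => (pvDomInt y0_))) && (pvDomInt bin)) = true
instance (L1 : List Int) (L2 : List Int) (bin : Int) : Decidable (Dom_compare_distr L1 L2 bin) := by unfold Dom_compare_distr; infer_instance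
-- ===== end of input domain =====

-- B replaces A's per-bin rescans of the whole list by one arithmetic bucketing pass per list
-- (objective: faster). Both A and B sort L1 and L2 in place (same side effect); the equivalence
-- proved here is about the return value.

-- ===== PORT A =====
-- A's inner loop: 'for y in range(a): if temp_LL <= L[y] < temp_UL: count1 += 1'
def countBetween (L : List Int) (tLL : Int) (tUL : Int) : Int :=
  (PySem.List.pyRange 0 (L.length : Int) 1).foldl
    (fun c y => if tLL ≤ PySem.List.pyGetD L y 0 ∧ PySem.List.pyGetD L y 0 < tUL then c + 1 else c) 0

-- A's histogram block for one (sorted, non-empty) list; a = the length variable A uses.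
-- 'int(range_L/bin)' is ported as Int.truncdiv: exact for |range_L| < 2^53, which Dom guarantees.
def histA (L : List Int) (a : Nat) (bin : Int) : List Int :=
  let LL := PySem.List.pyGetD L 0 0
  let UL := PySem.List.pyGetD L ((a : Int) - 1) 0
  let rng := UL - LL
  let count := PySem.Int.truncdiv rng bin + 1
  ((PySem.List.pyRange 0 count 1).foldl
    (fun (st : List Int × Int × Int) _x =>
      (st.1 ++ [countBetween L st.2.1 st.2.2], st.2.1 + bin, st.2.2 + bin))
    (([] : List Int), LL, LL + bin)).1

def compare_distr (L1 : List Int) (L2 : List Int) (bin : Int) : Bool :=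
  let a := L1.length
  let b := L2.length
  if (a : Int) ≠ (b : Int) then false
  else if (a : Int) = 0 ∨ (b : Int) = 0 then false
  else
    let L1s := PySem.List.sorted L1 (fun x => x) false
    let x1 := histA L1s a bin
    let L2s := PySem.List.sorted L2 (fun x => x) false
    let x2 := histA L2s b bin
    if x1 = x2 then true else false

-- ===== PORT B =====
-- B's one-pass histogram: counts[(x-lo)//bin] += 1 over a preallocated counts list.
-- 'counts[k] += 1' is ported with pySetD/pyGetD: exact while k is in range (guaranteed on Pre_).
def histB (L : List Int) (bin : Int) : List Int :=
  let lo := PySem.List.pyGetD L 0 0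
  let hi := PySem.List.pyGetD L (-1) 0
  let n := PySem.Int.floordiv (hi - lo) bin + 1
  let counts : List Int := List.replicate n.toNat 0
  L.foldl (fun cs x =>
    PySem.List.pySetD cs (PySem.Int.floordiv (x - lo) bin)
      (PySem.List.pyGetD cs (PySem.Int.floordiv (x - lo) bin) 0 + 1)) counts

def compare_distr_alt (L1 : List Int) (L2 : List Int) (bin : Int) : Bool :=
  if L1.length ≠ L2.length ∨ L1.length = 0 then false
  else
    let L1s := PySem.List.sorted L1 (fun x => x) false
    let L2s := PySem.List.sorted L2 (fun x => x) false
    histB L1s bin == histB L2s bin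

-- ===== PRECONDITION & SPEC =====
-- Pre_ excludes bin ≤ 0 on the inputs that reach the histogram (equal lengths, non-empty):
-- bin = 0 makes A raise ZeroDivisionError, and a negative bin width is outside the natural
-- domain of a binned histogram (every interval [t, t+bin) is then empty, so A degenerately
-- compares lists of zeros), where B's bucket indexing instead raises.
def Pre_compare_distr (L1 : List Int) (L2 : List Int) (bin : Int) : Prop :=
  L1.length = L2.length → L1 ≠ [] → 1 ≤ bin
instance (L1 : List Int) (L2 : List Int) (bin : Int) : Decidable (Pre_compare_distr L1 L2 bin) := by
  unfold Pre_compare_distr; infer_instance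
def pvWitness_compare_distr : List Int × List Int × Int := ([3, 1, 2], [2, 2, 4], 2)

def Spec_compare_distr (L1 : List Int) (L2 : List Int) (bin : Int) (out : Bool) : Prop := out = compare_distr_alt L1 L2 bin
instance (L1 : List Int) (L2 : List Int) (bin : Int) (out : Bool) : Decidable (Spec_compare_distr L1 L2 bin out) := by unfold Spec_compare_distr; infer_instance

-- ===== CLAIM (what is proved, stated in full; the proofs are below) =====
def Claim_equal_compare_distr : Prop := ∀ (L1 : List Int) (L2 : List Int) (bin : Int), Dom_compare_distr L1 L2 bin → Pre_compare_distr L1 L2 bin → Spec_compare_distr L1 L2 bin (compare_distr L1 L2 bin)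

-- ===== LEMMAS AND PROOFS =====

-- A's inner loop counts the elements of L lying in [tLL, tUL).
theorem countBetween_eq (L : List Int) (tLL tUL : Int) :
    countBetween L tLL tUL = (L.countP (fun v => decide (tLL ≤ v ∧ v < tUL)) : Int) := by
  unfold countBetween
  rw [PySem.List.foldl_pyRange_zero_pyGetD' L 0
    (fun c v => if tLL ≤ v ∧ v < tUL then c + 1 else c) 0]
  simpa using PySem.List.foldl_count_if (fun v => decide (tLL ≤ v ∧ v < tUL)) L 0

-- A's outer loop produces one countBetween per bin, with boundaries t + j*bin.
theorem outerA (L : List Int) (bin : Int) (r : List Int) (acc : List Int) (t : Int) :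
    (r.foldl
      (fun (st : List Int × Int × Int) _x =>
        (st.1 ++ [countBetween L st.2.1 st.2.2], st.2.1 + bin, st.2.2 + bin))
      (acc, t, t + bin)).1
    = acc ++ (List.range r.length).map
        (fun j : Nat => countBetween L (t + (j : Int) * bin) (t + (j : Int) * bin + bin)) := by
  induction r generalizing acc t with
  | nil => simp
  | cons x r ih =>
    simp only [List.foldl_cons, List.length_cons]
    have h := ih (acc ++ [countBetween L t (t + bin)]) (t + bin)
    rw [h, List.range_succ_eq_map, List.map_cons, List.map_map, ← List.append_cons]
    congr 2
    · simp
    · apply List.map_congr_left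
      intro j _
      have harith : t + bin + (j : Int) * bin = t + ((Nat.succ j : Nat) : Int) * bin := by
        push_cast; ring
      simp [Function.comp, harith]

theorem histA_eq_map (L : List Int) (a : Nat) (bin : Int) :
    histA L a bin
    = (List.range (PySem.Int.truncdiv (PySem.List.pyGetD L ((a : Int) - 1) 0 - PySem.List.pyGetD L 0 0) bin + 1).toNat).map
        (fun j : Nat => countBetween L (PySem.List.pyGetD L 0 0 + (j : Int) * bin)
          (PySem.List.pyGetD L 0 0 + (j : Int) * bin + bin)) := by
  unfold histA
  rw [outerA]
  simp [PySem.List.length_pyRange_one]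

-- B's fold preserves the length of the counts list.
theorem foldB_length (lo bin : Int) (M : List Int) (cs : List Int) :
    (M.foldl (fun cs x =>
      PySem.List.pySetD cs (PySem.Int.floordiv (x - lo) bin)
        (PySem.List.pyGetD cs (PySem.Int.floordiv (x - lo) bin) 0 + 1)) cs).length = cs.length := by
  induction M generalizing cs with
  | nil => rfl
  | cons x M ih => simp [ih, PySem.List.length_pySetD]

-- B's fold adds, at position j, the number of processed elements whose bucket index is j.
theorem foldB_getD (lo bin : Int) (M : List Int) (cs : List Int) (j : Nat)
    (hM : ∀ x ∈ M, 0 ≤ PySem.Int.floordiv (x - lo) bin ∧ PySem.Int.floordiv (x - lo) bin < (cs.length : Int)) :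
    (M.foldl (fun cs x =>
      PySem.List.pySetD cs (PySem.Int.floordiv (x - lo) bin)
        (PySem.List.pyGetD cs (PySem.Int.floordiv (x - lo) bin) 0 + 1)) cs).getD j 0
    = cs.getD j 0 + (M.countP (fun x => decide (PySem.Int.floordiv (x - lo) bin = (j : Int))) : Int) := by
  induction M generalizing cs with
  | nil => simp
  | cons x M ih =>
    obtain ⟨hk0, hklt⟩ := hM x (by simp)
    have hkcast : PySem.Int.floordiv (x - lo) bin
        = (((PySem.Int.floordiv (x - lo) bin).toNat : Nat) : Int) := (Int.toNat_of_nonneg hk0).symm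
    have hlt : (PySem.Int.floordiv (x - lo) bin).toNat < cs.length := by omega
    have hM' : ∀ y ∈ M, 0 ≤ PySem.Int.floordiv (y - lo) bin ∧
        PySem.Int.floordiv (y - lo) bin <
          ((PySem.List.pySetD cs (PySem.Int.floordiv (x - lo) bin)
            (PySem.List.pyGetD cs (PySem.Int.floordiv (x - lo) bin) 0 + 1)).length : Int) := by
      intro y hy
      rw [PySem.List.length_pySetD]
      exact hM y (by simp [hy])
    simp only [List.foldl_cons]
    rw [ih _ hM']
    have hset : (PySem.List.pySetD cs (PySem.Int.floordiv (x - lo) bin)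
          (PySem.List.pyGetD cs (PySem.Int.floordiv (x - lo) bin) 0 + 1)).getD j 0
        = cs.getD j 0 + (if PySem.Int.floordiv (x - lo) bin = (j : Int) then 1 else 0) := by
      rw [hkcast, PySem.List.pySetD_natCast, PySem.List.pyGetD_natCast]
      by_cases hj : (PySem.Int.floordiv (x - lo) bin).toNat = j
      · rw [if_pos (by omega), ← hj]
        simp [List.getD_eq_getElem?_getD, hlt]
      · rw [if_neg (by omega)]
        simp only [List.getD_eq_getElem?_getD, List.getElem?_set]
        rw [if_neg (by omega)]
        simp
    rw [hset, List.countP_cons]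
    by_cases hx : PySem.Int.floordiv (x - lo) bin = (j : Int)
    · simp [hx]; ring
    · simp [hx]

-- int(a/b) = a//b for a non-negative numerator and positive divisor.
theorem truncdiv_eq_floordiv (a b : Int) (ha : 0 ≤ a) (hb : 0 < b) :
    PySem.Int.truncdiv a b = PySem.Int.floordiv a b := by
  rw [PySem.Int.floordiv_eq_ediv_of_pos hb]
  show a.tdiv b = a / b
  exact Int.tdiv_eq_ediv_of_nonneg ha

-- B's histogram, in closed form, on a list whose elements all lie between L[0] and L[-1].
theorem histB_eq_map (L : List Int) (bin : Int) (hLne : L ≠ []) (hbin : 1 ≤ bin)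
    (hub : ∀ x ∈ L, PySem.List.pyGetD L 0 0 ≤ x ∧ x ≤ PySem.List.pyGetD L (-1) 0) :
    histB L bin
    = (List.range (PySem.Int.floordiv (PySem.List.pyGetD L (-1) 0 - PySem.List.pyGetD L 0 0) bin + 1).toNat).map
        (fun j : Nat =>
          (L.countP (fun x => decide (PySem.Int.floordiv (x - PySem.List.pyGetD L 0 0) bin = (j : Int))) : Int)) := by
  unfold histB
  have hb0 : (0 : Int) < bin := by omega
  have hidx : ∀ x ∈ L, 0 ≤ PySem.Int.floordiv (x - PySem.List.pyGetD L 0 0) bin ∧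
      PySem.Int.floordiv (x - PySem.List.pyGetD L 0 0) bin
        ≤ PySem.Int.floordiv (PySem.List.pyGetD L (-1) 0 - PySem.List.pyGetD L 0 0) bin := by
    intro x hx
    obtain ⟨hlo, hhi⟩ := hub x hx
    rw [PySem.Int.floordiv_eq_ediv_of_pos hb0, PySem.Int.floordiv_eq_ediv_of_pos hb0]
    exact ⟨Int.ediv_nonneg (by omega) (by omega), Int.ediv_le_ediv hb0 (by omega)⟩
  have hn0 : 0 ≤ PySem.Int.floordiv (PySem.List.pyGetD L (-1) 0 - PySem.List.pyGetD L 0 0) bin := by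
    obtain ⟨y, t, hyt⟩ := List.exists_cons_of_ne_nil hLne
    obtain ⟨hlo, hhi⟩ := hub y (by rw [hyt]; simp)
    rw [PySem.Int.floordiv_eq_ediv_of_pos hb0]
    exact Int.ediv_nonneg (by omega) (by omega)
  apply List.ext_getElem
  · rw [foldB_length]
    simp
  · intro i hi1 hi2
    have hilt : i < (PySem.Int.floordiv (PySem.List.pyGetD L (-1) 0 - PySem.List.pyGetD L 0 0) bin + 1).toNat := by
      rw [foldB_length] at hi1
      simpa using hi1
    rw [← List.getD_eq_getElem _ 0 hi1]
    rw [foldB_getD _ _ _ _ _ (by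
      intro x hx
      obtain ⟨h1, h2⟩ := hidx x hx
      refine ⟨h1, ?_⟩
      rw [List.length_replicate]
      omega)]
    have hrep : (List.replicate (PySem.Int.floordiv (PySem.List.pyGetD L (-1) 0 - PySem.List.pyGetD L 0 0) bin + 1).toNat (0 : Int)).getD i 0 = 0 := by
      simp only [List.getD_eq_getElem?_getD, List.getElem?_replicate]
      rw [if_pos hilt]
      rfl
    rw [hrep]
    simp

-- On a sorted non-empty list with positive bin the two histograms agree.
theorem hist_agree (L : List Int) (bin : Int) (hL : L ≠ []) (hbin : 1 ≤ bin) :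
    histA (PySem.List.sorted L (fun x => x) false) L.length bin
    = histB (PySem.List.sorted L (fun x => x) false) bin := by
  have hb0 : (0 : Int) < bin := by omega
  have hlenS : (PySem.List.sorted L (fun x => x) false).length = L.length :=
    PySem.List.length_sorted L (fun x => x) false
  have hSne : PySem.List.sorted L (fun x => x) false ≠ [] := by
    intro h
    exact hL ((PySem.List.sorted_eq_nil_iff L (fun x => x) false).mp h)
  have hpos : 0 < (PySem.List.sorted L (fun x => x) false).length := by
    cases h : PySem.List.sorted L (fun x => x) false with
    | nil => exact absurd h hSne
    | cons y t => simp
  have hlo : PySem.List.pyGetD (PySem.List.sorted L (fun x => x) false) 0 0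
      = (PySem.List.sorted L (fun x => x) false)[0]'hpos := by
    rw [PySem.List.pyGetD_eq_getElem _ 0 (by omega) (by exact_mod_cast hpos)]
    simp
  have hhiB : PySem.List.pyGetD (PySem.List.sorted L (fun x => x) false) (-1) 0
      = (PySem.List.sorted L (fun x => x) false)[(PySem.List.sorted L (fun x => x) false).length - 1]'(by omega) := by
    rw [PySem.List.pyGetD_neg_one _ _ hSne]
    exact List.getLast_eq_getElem hSne
  have hhiA : PySem.List.pyGetD (PySem.List.sorted L (fun x => x) false) ((L.length : Int) - 1) 0
      = PySem.List.pyGetD (PySem.List.sorted L (fun x => x) false) (-1) 0 := by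
    rw [hhiB, PySem.List.pyGetD_eq_getElem _ 0 (by omega) (by rw [hlenS]; omega)]
    congr 1
    omega
  have hub : ∀ x ∈ PySem.List.sorted L (fun x => x) false,
      PySem.List.pyGetD (PySem.List.sorted L (fun x => x) false) 0 0 ≤ x ∧
      x ≤ PySem.List.pyGetD (PySem.List.sorted L (fun x => x) false) (-1) 0 := by
    intro x hx
    obtain ⟨i, hi, rfl⟩ := List.mem_iff_getElem.mp hx
    rw [hlo, hhiB]
    exact ⟨PySem.List.sorted_id_getElem_mono L (by omega) hi,
           PySem.List.sorted_id_getElem_mono L (by omega) (by omega)⟩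
  have hrange0 : (0 : Int) ≤ PySem.List.pyGetD (PySem.List.sorted L (fun x => x) false) (-1) 0
      - PySem.List.pyGetD (PySem.List.sorted L (fun x => x) false) 0 0 := by
    rw [hlo, hhiB]
    have := PySem.List.sorted_id_getElem_mono (xs := L) (p := 0)
      (q := (PySem.List.sorted L (fun x => x) false).length - 1) (by omega) (by omega)
    omega
  rw [histA_eq_map, histB_eq_map _ _ hSne hbin hub, hhiA]
  rw [truncdiv_eq_floordiv _ _ hrange0 hb0]
  apply List.map_congr_left
  intro j _
  rw [countBetween_eq]
  congr 1
  apply List.countP_congr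
  intro v hv
  simp only [decide_eq_true_eq]
  rw [PySem.Int.floordiv_eq_iff_of_pos hb0]
  have hone : ((j : Int) + 1) * bin = (j : Int) * bin + bin := by ring
  constructor
  · rintro ⟨h1, h2⟩
    exact ⟨by linarith, by linarith⟩
  · rintro ⟨h1, h2⟩
    exact ⟨by linarith, by linarith⟩

-- ===== VERDICT (by name: the statement is the Claim_ definition above) =====
theorem compare_distr_spec : Claim_equal_compare_distr := by
  intro L1 L2 bin _hDom hPre
  simp only [Spec_compare_distr, compare_distr, compare_distr_alt]
  by_cases hlen : L1.length = L2.length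
  · by_cases hnil : L1 = []
    · have h2 : L2 = [] := by
        cases L2 with
        | nil => rfl
        | cons y t => subst hnil; simp at hlen
      subst hnil; subst h2
      simp
    · have hbin := hPre hlen hnil
      have h1pos : L1.length ≠ 0 := by
        cases L1 with
        | nil => exact absurd rfl hnil
        | cons y t => simp
      have h2ne : L2 ≠ [] := fun h => h1pos (by rw [hlen, h]; rfl)
      have e1 := hist_agree L1 bin hnil hbin
      have e2 := hist_agree L2 bin h2ne hbin
      rw [if_neg (show ¬((L1.length : Int) ≠ (L2.length : Int)) by simp [hlen])]
      rw [if_neg (show ¬((L1.length : Int) = 0 ∨ (L2.length : Int) = 0) by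
        push Not
        constructor <;> simp <;> omega)]
      rw [if_neg (show ¬(L1.length ≠ L2.length ∨ L1.length = 0) by
        push Not
        exact ⟨hlen, h1pos⟩)]
      rw [e1, e2]
      by_cases hx : histB (PySem.List.sorted L1 (fun x => x) false) bin
          = histB (PySem.List.sorted L2 (fun x => x) false) bin
      · rw [if_pos hx, hx]
        simp
      · rw [if_neg hx]
        simp [hx]
  · rw [if_pos (show ((L1.length : Int) ≠ (L2.length : Int)) by simp [hlen])]
    rw [if_pos (Or.inl hlen)]
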